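-- pv_equiv track=rewrite | github.com/cry999/AtCoder | beginner/093/B.py | small_and_large_integers
-- ===== SOURCE A (Python) =====
-- def small_and_large_integers(A: int, B: int, K: int) -> list:
--     l, r = [], []
--     for k in range(K):
--         if A + k == B - k:
--             l = l + [A+k]
--             break
--         if B - k < A + k:
--             break
--
--         l = l + [A+k]
--
--         r = [B-k] + r
--     return l + r
-- ===== SOURCE B (Python) =====
-- def small_and_large_integers(A: int, B: int, K: int) -> list:
--     small = range(A, min(A + K, B + 1))
--     large = range(max(B - K + 1, A), B + 1)
--     return sorted(set(small) | set(large))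
-- ===== Notes on version B (the rewrite author's own statement) =====
-- stated objective: simpler
-- what changed: Replaces the incremental two-sided loop with breaks by two closed-form clipped ranges (K smallest, K largest), a set union and a sort.
import Mathlib
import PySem

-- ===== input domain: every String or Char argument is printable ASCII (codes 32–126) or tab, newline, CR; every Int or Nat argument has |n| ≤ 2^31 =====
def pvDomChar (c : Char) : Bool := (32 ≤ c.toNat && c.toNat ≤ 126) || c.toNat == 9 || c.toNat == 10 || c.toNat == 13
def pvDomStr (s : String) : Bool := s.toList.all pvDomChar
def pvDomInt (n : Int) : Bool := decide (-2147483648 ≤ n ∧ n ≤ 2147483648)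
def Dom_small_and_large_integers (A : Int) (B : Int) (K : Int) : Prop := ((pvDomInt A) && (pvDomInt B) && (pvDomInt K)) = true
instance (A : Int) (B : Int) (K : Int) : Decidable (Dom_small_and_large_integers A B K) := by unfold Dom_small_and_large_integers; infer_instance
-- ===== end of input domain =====

-- B replaces A's incremental two-sided loop with two closed-form clipped ranges, a set union and a sort (simpler; return value proved equal on all inputs).

-- ===== PORT A =====
-- the 'for k in range(K)' loop with its two breaks, carrying the accumulators l and r;
-- range(K) is lazy in Python, so the loop counter k is carried directly (fuel = K - k iterations remain)
def pvALoop (A : Int) (B : Int) (k : Int) (fuel : Nat) (l : List Int) (r : List Int) : List Int :=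
  match fuel with
  | 0 => l ++ r
  | Nat.succ fuel' =>
    if A + k = B - k then (l ++ [A + k]) ++ r        -- l = l + [A+k]; break
    else if B - k < A + k then l ++ r                 -- break
    else pvALoop A B (k + 1) fuel' (l ++ [A + k]) ([B - k] ++ r)

def small_and_large_integers (A : Int) (B : Int) (K : Int) : List Int :=
  pvALoop A B 0 K.toNat [] []

-- ===== PORT B =====
def small_and_large_integers_alt (A : Int) (B : Int) (K : Int) : List Int :=
  let small := PySem.List.pyRange A (min (A + K) (B + 1)) 1
  let large := PySem.List.pyRange (max (B - K + 1) A) (B + 1) 1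
  PySem.List.sorted (PySem.Set.union (PySem.Set.ofList small) (PySem.Set.ofList large)) (fun x => x) false

-- ===== PRECONDITION & SPEC =====
def Spec_small_and_large_integers (A : Int) (B : Int) (K : Int) (out : List Int) : Prop := out = small_and_large_integers_alt A B K
instance (A : Int) (B : Int) (K : Int) (out : List Int) : Decidable (Spec_small_and_large_integers A B K out) := by unfold Spec_small_and_large_integers; infer_instance

-- ===== CLAIM (what is proved, stated in full; the proofs are below) =====
def Claim_equal_small_and_large_integers : Prop := ∀ (A : Int) (B : Int) (K : Int), Dom_small_and_large_integers A B K → Spec_small_and_large_integers A B K (small_and_large_integers A B K)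

-- ===== LEMMAS AND PROOFS =====

-- the common closed form both ports are proved equal to
def pvTarget (A : Int) (B : Int) (K : Int) : List Int :=
  if B - A ≤ 2 * K - 2 then PySem.List.pyRange A (B + 1) 1
  else PySem.List.pyRange A (A + K) 1 ++ PySem.List.pyRange (B - K + 1) (B + 1) 1

theorem pvALoop_char (A B K : Int) : ∀ (n : Nat) (j : Int), (K - j).toNat = n → 0 ≤ j → j ≤ K → 2 * j ≤ B - A + 1 →
    pvALoop A B j n (PySem.List.pyRange A (A + j) 1) (PySem.List.pyRange (B - j + 1) (B + 1) 1) = pvTarget A B K := by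
  intro n
  induction n with
  | zero =>
    intro j hn h0 hjK hinv
    have hjK' : j = K := by omega
    subst hjK'
    unfold pvALoop pvTarget
    rw [if_neg (by omega)]
  | succ n ih =>
    intro j hn h0 hjK hinv
    have hjlt : j < K := by omega
    unfold pvALoop
    by_cases h1 : A + j = B - j
    · rw [if_pos h1]
      have hmid : A + j + 1 = B - j + 1 := by omega
      unfold pvTarget
      rw [if_pos (by omega)]
      rw [← PySem.List.pyRange_one_succ_right (by omega), hmid]
      exact (PySem.List.pyRange_one_append A (B - j + 1) (B + 1) (by omega) (by omega)).symm
    · rw [if_neg h1]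
      by_cases h2 : B - j < A + j
      · rw [if_pos h2]
        -- here 2*j = B - A + 1 exactly: the two halves meet
        unfold pvTarget
        rw [if_pos (by omega)]
        have hmid : A + j = B - j + 1 := by omega
        rw [hmid]
        exact (PySem.List.pyRange_one_append A (B - j + 1) (B + 1) (by omega) (by omega)).symm
      · rw [if_neg h2]
        have e1 : PySem.List.pyRange A (A + j) 1 ++ [A + j] = PySem.List.pyRange A (A + (j + 1)) 1 := by
          rw [show A + (j + 1) = (A + j) + 1 by ring, PySem.List.pyRange_one_succ_right (by omega)]
        have e2 : [B - j] ++ PySem.List.pyRange (B - j + 1) (B + 1) 1 = PySem.List.pyRange (B - (j + 1) + 1) (B + 1) 1 := by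
          rw [show B - (j + 1) + 1 = B - j by ring, PySem.List.pyRange_one_cons (show B - j < B + 1 by omega)]
          rfl
        rw [e1, e2]
        exact ih (j + 1) (by omega) (by omega) (by omega) (by omega)

theorem portA_eq_target (A B K : Int) : small_and_large_integers A B K = pvTarget A B K := by
  unfold small_and_large_integers
  by_cases hK : K ≤ 0
  · rw [show K.toNat = 0 by omega]
    unfold pvALoop pvTarget
    by_cases h : B - A ≤ 2 * K - 2
    · rw [if_pos h, PySem.List.pyRange_one_eq_nil (by omega)]; rfl
    · rw [if_neg h, PySem.List.pyRange_one_eq_nil (by omega),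
        PySem.List.pyRange_one_eq_nil (show B + 1 ≤ B - K + 1 by omega)]
  · by_cases hB : B < A - 1
    · -- first iteration breaks immediately: B - 0 < A + 0
      obtain ⟨n, hn⟩ : ∃ n, K.toNat = n + 1 := ⟨K.toNat - 1, by omega⟩
      rw [hn]
      unfold pvALoop
      rw [if_neg (by omega), if_pos (by omega)]
      unfold pvTarget
      rw [if_pos (by omega), PySem.List.pyRange_one_eq_nil (by omega)]
      rfl
    · have h := pvALoop_char A B K K.toNat 0 (by omega) (le_refl 0) (by omega) (by omega)
      rw [PySem.List.pyRange_one_eq_nil (show A + 0 ≤ A by omega),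
        PySem.List.pyRange_one_eq_nil (show B + 1 ≤ B - 0 + 1 by omega)] at h
      exact h

theorem mem_target (A B K x : Int) : x ∈ pvTarget A B K ↔
    ((A ≤ x ∧ x < min (A + K) (B + 1)) ∨ (max (B - K + 1) A ≤ x ∧ x < B + 1)) := by
  unfold pvTarget
  by_cases h : B - A ≤ 2 * K - 2
  · rw [if_pos h, PySem.List.mem_pyRange_one]; omega
  · rw [if_neg h, List.mem_append, PySem.List.mem_pyRange_one, PySem.List.mem_pyRange_one]; omega

theorem target_pairwise (A B K : Int) : (pvTarget A B K).Pairwise (· < ·) := by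
  unfold pvTarget
  by_cases h : B - A ≤ 2 * K - 2
  · rw [if_pos h]; exact PySem.List.pairwise_lt_pyRange_one _ _
  · rw [if_neg h]
    rw [List.pairwise_append]
    refine ⟨PySem.List.pairwise_lt_pyRange_one _ _, PySem.List.pairwise_lt_pyRange_one _ _, ?_⟩
    intro x hx y hy
    rw [PySem.List.mem_pyRange_one] at hx hy
    omega

theorem portB_eq_target (A B K : Int) : small_and_large_integers_alt A B K = pvTarget A B K := by
  unfold small_and_large_integers_alt
  apply PySem.List.sorted_eq_of_perm_of_pairwise_lt
  · apply (List.perm_ext_iff_of_nodup ?_ ?_).mpr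
    · intro x
      rw [mem_target, PySem.Set.mem_union, PySem.Set.mem_ofList, PySem.Set.mem_ofList,
        PySem.List.mem_pyRange_one, PySem.List.mem_pyRange_one]
    · exact ((target_pairwise A B K).imp fun h => ne_of_lt h)
    · exact PySem.Set.nodup_union _ _ (PySem.Set.nodup_ofList _)
  · exact target_pairwise A B K

-- ===== VERDICT (by name: the statement is the Claim_ definition above) =====
theorem small_and_large_integers_spec : Claim_equal_small_and_large_integers := by
  intro A B K _
  unfold Spec_small_and_large_integers
  rw [portA_eq_target, portB_eq_target]
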